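-- pv_equiv track=rewrite | github.com/syafiul060-beep/trakaa | traka/tool/snackbar_theme_codemod.py | _next_snackbar_widget
-- ===== SOURCE A (Python) =====
-- def _next_snackbar_widget(src: str, start: int) -> int:
--     """Index of SnackBar( widget — bukan substring di dalam showSnackBar(."""
--     while True:
--         j = src.find("SnackBar(", start)
--         if j < 0:
--             return -1
--         if j >= 4 and src[j - 4 : j] == "show":
--             start = j + 1
--             continue
--         return j
-- ===== SOURCE B (Python) =====
-- def _next_snackbar_widget(src: str, start: int) -> int:
--     """Single left-to-right scan: first position at/after start where the
--     9-char window is "SnackBar(" and the 4 chars before it are not "show"."""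
--     n = len(src)
--     i = start if start >= 0 else max(n + start, 0)
--     for k in range(i, n):
--         if src[k:k + 9] == "SnackBar(" and not (k >= 4 and src[k - 4:k] == "show"):
--             return k
--     return -1
-- ===== Notes on version B (the rewrite author's own statement) =====
-- stated objective: alternative
-- what changed: A repeatedly calls str.find and restarts the search after each show-prefixed hit; B makes one left-to-right scan that tests each position directly for the 'SnackBar(' window not preceded by 'show'.
import Mathlib
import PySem

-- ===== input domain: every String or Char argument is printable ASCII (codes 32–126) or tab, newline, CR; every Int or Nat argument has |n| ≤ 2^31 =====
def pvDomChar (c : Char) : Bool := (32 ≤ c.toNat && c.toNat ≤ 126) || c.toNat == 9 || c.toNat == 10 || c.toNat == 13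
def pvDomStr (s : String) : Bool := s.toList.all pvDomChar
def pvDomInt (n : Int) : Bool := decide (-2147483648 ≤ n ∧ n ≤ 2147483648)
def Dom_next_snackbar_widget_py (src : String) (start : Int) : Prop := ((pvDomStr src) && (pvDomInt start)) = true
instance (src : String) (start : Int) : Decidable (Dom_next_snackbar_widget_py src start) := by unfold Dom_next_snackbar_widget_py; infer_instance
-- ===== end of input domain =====

-- B replaces A's find-then-retry loop (str.find restarted after each rejected
-- "showSnackBar(" hit) by a single left-to-right scan that tests each position
-- directly (objective: alternative; same worst-case cost, no find/restart loop).

-- ===== PORT A =====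
-- the effective (clamped) start index str.find uses; cited by A's termination proof
def pvClamp (n : Nat) (st : Int) : Nat :=
  if st < 0 then (max (st + (n : Int)) 0).toNat else min st.toNat n

theorem pvClamp_le (n : Nat) (st : Int) : pvClamp n st ≤ n := by
  unfold pvClamp; split <;> omega

theorem pvSnack_ne : "SnackBar(".toList ≠ [] := by decide

theorem pvSnack_len : "SnackBar(".toList.length = 9 := by decide

theorem pvFind_empty (sub : List Char) (hsub : sub ≠ []) :
    PySem.Chars.find [] sub = -1 := by
  rw [PySem.Chars.find_eq_neg_one_iff]
  intro hc
  exact hsub (List.eq_nil_of_infix_nil hc)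

-- findFrom at an arbitrary Int start equals findFrom at the clamped Nat start (nonempty needle)
theorem pvFindFrom_clamp (cs sub : List Char) (hsub : sub ≠ []) (st : Int) :
    PySem.Chars.findFrom cs sub st none =
      PySem.Chars.findFrom cs sub ((pvClamp cs.length st : Nat) : Int) none := by
  rw [PySem.Chars.findFrom_natCast cs sub _ (pvClamp_le cs.length st)]
  unfold PySem.Chars.findFrom pvClamp
  by_cases h0 : st < 0
  · simp only [if_pos h0, Int.toNat_natCast, List.take_length]
    by_cases h1 : st + (cs.length : Int) < 0
    · have hm : (max (st + (cs.length:Int)) 0).toNat = 0 := by omega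
      simp only [if_pos h1, hm]
      rw [if_neg (by omega : ¬ ((cs.length:Int) < 0))]
      simp
    · have hm : (max (st + (cs.length:Int)) 0).toNat = (st + (cs.length:Int)).toNat := by omega
      have hc : ((st + (cs.length:Int)).toNat : Int) = st + cs.length := by omega
      simp only [if_neg h1, hm, hc]
      rw [if_neg (by omega : ¬ ((cs.length:Int) < st + cs.length))]
  · simp only [if_neg h0, Int.toNat_natCast, List.take_length]
    by_cases h2 : (cs.length : Int) < st
    · have hm : min st.toNat cs.length = cs.length := by omega
      simp only [if_pos h2, hm, List.drop_length, pvFind_empty sub hsub]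
      simp
    · have hm : min st.toNat cs.length = st.toNat := by omega
      have hc : (st.toNat : Int) = st := by omega
      simp only [if_neg h2, hm, hc]

-- what a successful find gives: first "SnackBar(" occurrence at/after the clamped start
theorem pvFind_facts (cs : List Char) (start : Int) (j : Int)
    (hj : j = PySem.Chars.findFrom cs "SnackBar(".toList start none) (h : ¬ j < 0) :
    pvClamp cs.length start ≤ j.toNat ∧ j.toNat < cs.length ∧
      "SnackBar(".toList <+: cs.drop j.toNat ∧
      (∀ i : Nat, pvClamp cs.length start ≤ i → i < j.toNat → ¬ "SnackBar(".toList <+: cs.drop i) := by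
  rw [pvFindFrom_clamp cs _ pvSnack_ne start] at hj
  have hne : PySem.Chars.findFrom cs "SnackBar(".toList ((pvClamp cs.length start : Nat) : Int) none ≠ -1 := by
    omega
  obtain ⟨h1, h2, h3⟩ := PySem.Chars.findFrom_natCast_spec cs "SnackBar(".toList
    (pvClamp cs.length start) (pvClamp_le cs.length start) hne
  rw [← hj] at h1 h2 h3
  have hlen : j.toNat < cs.length := by
    have := h2.length_le
    rw [pvSnack_len, List.length_drop] at this
    omega
  exact ⟨by omega, hlen, h2, h3⟩

def pvALoop (cs : List Char) (start : Int) : Int :=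
  let j := PySem.Chars.findFrom cs "SnackBar(".toList start none
  if j < 0 then -1
  else
    if 4 ≤ j ∧ PySem.Chars.slice cs (some (j - 4)) (some j) = "show".toList then
      pvALoop cs (j + 1)
    else j
termination_by cs.length + 1 - pvClamp cs.length start
decreasing_by
  rename_i hneg _
  obtain ⟨h1, h2, -, -⟩ := pvFind_facts cs start _ rfl hneg
  have hc1 : pvClamp cs.length (PySem.Chars.findFrom cs "SnackBar(".toList start none + 1)
      = (PySem.Chars.findFrom cs "SnackBar(".toList start none).toNat + 1 := by
    unfold pvClamp
    rw [if_neg (by omega)]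
    omega
  have hc2 : pvClamp cs.length start ≤ cs.length := pvClamp_le cs.length start
  rw [hc1]
  omega

def next_snackbar_widget_py (src : String) (start : Int) : Int :=
  pvALoop src.toList start

-- ===== PORT B =====
def pvBScan (cs : List Char) (k : Nat) : Int :=
  if k < cs.length then
    if PySem.Chars.slice cs (some (k : Int)) (some ((k : Int) + 9)) = "SnackBar(".toList ∧
        ¬(4 ≤ k ∧ PySem.Chars.slice cs (some ((k : Int) - 4)) (some (k : Int)) = "show".toList) then
      (k : Int)
    else pvBScan cs (k + 1)
  else -1
termination_by cs.length - k

def next_snackbar_widget_py_alt (src : String) (start : Int) : Int :=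
  let n : Int := src.toList.length
  let i : Int := if 0 ≤ start then start else max (n + start) 0
  pvBScan src.toList i.toNat

-- ===== PRECONDITION & SPEC =====
def Spec_next_snackbar_widget_py (src : String) (start : Int) (out : Int) : Prop := out = next_snackbar_widget_py_alt src start
instance (src : String) (start : Int) (out : Int) : Decidable (Spec_next_snackbar_widget_py src start out) := by unfold Spec_next_snackbar_widget_py; infer_instance

-- ===== CLAIM (what is proved, stated in full; the proofs are below) =====
def Claim_equal_next_snackbar_widget_py : Prop := ∀ (src : String) (start : Int), Dom_next_snackbar_widget_py src start → Spec_next_snackbar_widget_py src start (next_snackbar_widget_py src start)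

-- ===== LEMMAS AND PROOFS =====

-- slice bridge: B's 9-char window test is the prefix test on the k-th suffix
theorem pvSlice9 (cs : List Char) (k : Nat) :
    PySem.Chars.slice cs (some (k : Int)) (some ((k : Int) + 9)) = "SnackBar(".toList ↔
      "SnackBar(".toList <+: cs.drop k := by
  have hc : ((k : Int) + 9) = ((k + 9 : Nat) : Int) := by push_cast; ring
  rw [hc, PySem.Chars.slice_eq_listSlice, PySem.List.slice_natCast]
  have h9 : k + 9 - k = 9 := by omega
  rw [h9, List.prefix_iff_eq_take, pvSnack_len]
  exact eq_comm

theorem pvBScan_stop (cs : List Char) (k : Nat) (h : cs.length ≤ k) : pvBScan cs k = -1 := by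
  rw [pvBScan, if_neg (by omega)]

theorem pvBScan_skip (cs : List Char) (k : Nat) (h : k < cs.length)
    (hg : ¬ (PySem.Chars.slice cs (some (k : Int)) (some ((k : Int) + 9)) = "SnackBar(".toList ∧
        ¬(4 ≤ k ∧ PySem.Chars.slice cs (some ((k : Int) - 4)) (some (k : Int)) = "show".toList))) :
    pvBScan cs k = pvBScan cs (k + 1) := by
  rw [pvBScan, if_pos h, if_neg hg]

theorem pvBScan_hit (cs : List Char) (k : Nat) (h : k < cs.length)
    (hg : PySem.Chars.slice cs (some (k : Int)) (some ((k : Int) + 9)) = "SnackBar(".toList ∧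
        ¬(4 ≤ k ∧ PySem.Chars.slice cs (some ((k : Int) - 4)) (some (k : Int)) = "show".toList)) :
    pvBScan cs k = (k : Int) := by
  rw [pvBScan, if_pos h, if_pos hg]

-- the scan skips over any stretch with no "SnackBar(" occurrence
theorem pvBScan_congr (cs : List Char) (m : Nat) : ∀ k, k ≤ m →
    (∀ i, k ≤ i → i < m → ¬ "SnackBar(".toList <+: cs.drop i) →
    pvBScan cs k = pvBScan cs m := by
  induction m with
  | zero =>
    intro k hk _
    have : k = 0 := by omega
    rw [this]
  | succ m ih =>
    intro k hk hno
    by_cases he : k = m + 1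
    · rw [he]
    · have hkm : k ≤ m := by omega
      have h1 : pvBScan cs k = pvBScan cs m :=
        ih k hkm (fun i hi1 hi2 => hno i hi1 (by omega))
      by_cases hm : m < cs.length
      · rw [h1, pvBScan_skip cs m hm]
        intro hgood
        exact hno m hkm (by omega) ((pvSlice9 cs m).mp hgood.1)
      · rw [h1, pvBScan_stop cs m (by omega), pvBScan_stop cs (m+1) (by omega)]

theorem pvInfix_drop (cs sub : List Char) (c i : Nat) (hci : c ≤ i)
    (h : sub <+: cs.drop i) : sub <:+: cs.drop c := by
  have hd : cs.drop i = (cs.drop c).drop (i - c) := by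
    rw [List.drop_drop]; congr 1; omega
  rw [hd] at h
  exact h.isInfix.trans (List.drop_suffix _ _).isInfix

theorem pvBScan_none (cs : List Char) (k : Nat)
    (hno : ∀ i, k ≤ i → ¬ "SnackBar(".toList <+: cs.drop i) : pvBScan cs k = -1 := by
  by_cases h : k ≤ cs.length
  · rw [pvBScan_congr cs cs.length k h (fun i hi1 _ => hno i hi1), pvBScan_stop _ _ le_rfl]
  · exact pvBScan_stop _ _ (by omega)

-- main loop invariant: A's find/retry loop from start equals B's scan from the clamped start
theorem pvMain (cs : List Char) (fuel : Nat) : ∀ (start : Int),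
    cs.length + 1 - pvClamp cs.length start ≤ fuel →
    pvALoop cs start = pvBScan cs (pvClamp cs.length start) := by
  induction fuel with
  | zero =>
    intro start h
    have := pvClamp_le cs.length start
    omega
  | succ f ih =>
    intro start hf
    rw [pvALoop]
    by_cases hneg : PySem.Chars.findFrom cs "SnackBar(".toList start none < 0
    · rw [if_pos hneg]
      have hj : PySem.Chars.findFrom cs "SnackBar(".toList ((pvClamp cs.length start : Nat) : Int) none = -1 := by
        rw [PySem.Chars.findFrom_natCast cs _ _ (pvClamp_le cs.length start)]
        rw [pvFindFrom_clamp cs _ pvSnack_ne start,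
          PySem.Chars.findFrom_natCast cs _ _ (pvClamp_le cs.length start)] at hneg
        split at hneg
        · rename_i hfind
          rw [if_pos hfind]
        · rename_i hfind
          have := PySem.Chars.neg_one_le_find (List.drop (pvClamp cs.length start) cs) "SnackBar(".toList
          omega
      rw [PySem.Chars.findFrom_natCast_eq_neg_one_iff cs _ _ (pvClamp_le cs.length start)] at hj
      symm
      apply pvBScan_none
      intro i hi hpre
      exact hj (pvInfix_drop cs _ _ i hi hpre)
    · rw [if_neg hneg]
      obtain ⟨h1, h2, h3, h4⟩ := pvFind_facts cs start _ rfl hneg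
      have hjn : (((PySem.Chars.findFrom cs "SnackBar(".toList start none).toNat : Nat) : Int)
          = PySem.Chars.findFrom cs "SnackBar(".toList start none := by omega
      have hcongr : pvBScan cs (pvClamp cs.length start)
          = pvBScan cs (PySem.Chars.findFrom cs "SnackBar(".toList start none).toNat :=
        pvBScan_congr cs _ _ h1 h4
      by_cases hshow : 4 ≤ PySem.Chars.findFrom cs "SnackBar(".toList start none ∧
          PySem.Chars.slice cs (some (PySem.Chars.findFrom cs "SnackBar(".toList start none - 4))
            (some (PySem.Chars.findFrom cs "SnackBar(".toList start none)) = "show".toList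
      · rw [if_pos hshow]
        have hcl : pvClamp cs.length (PySem.Chars.findFrom cs "SnackBar(".toList start none + 1)
            = (PySem.Chars.findFrom cs "SnackBar(".toList start none).toNat + 1 := by
          unfold pvClamp
          rw [if_neg (by omega)]
          omega
        rw [ih _ (by rw [hcl]; have := pvClamp_le cs.length start; omega), hcl, hcongr]
        rw [← hjn] at hshow
        symm
        apply pvBScan_skip cs _ h2
        intro hgood
        exact hgood.2 ⟨by omega, hshow.2⟩
      · rw [if_neg hshow]
        rw [hcongr, pvBScan_hit cs _ h2, hjn]
        constructor
        · exact (pvSlice9 cs _).mpr h3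
        · intro hb
          apply hshow
          rw [← hjn]
          exact ⟨by omega, hb.2⟩

-- ===== VERDICT (by name: the statement is the Claim_ definition above) =====
theorem next_snackbar_widget_py_spec : Claim_equal_next_snackbar_widget_py := by
  intro src start _
  unfold Spec_next_snackbar_widget_py next_snackbar_widget_py next_snackbar_widget_py_alt
  rw [pvMain src.toList (src.toList.length + 1) start
    (by have := pvClamp_le src.toList.length start; omega)]
  show pvBScan src.toList (pvClamp src.toList.length start)
      = pvBScan src.toList (if 0 ≤ start then start
          else max ((src.toList.length : Int) + start) 0).toNat
  by_cases h0 : 0 ≤ start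
  · rw [if_pos h0]
    unfold pvClamp
    rw [if_neg (by omega)]
    by_cases hl : start.toNat ≤ src.toList.length
    · congr 1
      omega
    · rw [pvBScan_stop _ _ (by omega), pvBScan_stop _ _ (by omega)]
  · rw [if_neg h0]
    unfold pvClamp
    rw [if_pos (by omega)]
    congr 1
    omega
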